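-- pv_equiv track=rewrite | github.com/Donald-Watts/PhaseSync | PhaseSync/PhaseSync/symbol_compressor.py | compress_word
-- ===== SOURCE A (Python) =====
-- from typing import Tuple, Dict
--
-- alphabet: Dict[str, int] = {chr(i + 64): i for i in range(1, 27)}
--
-- def get_letter_value(char: str) -> int:
--     """
--     Get the numeric value for a letter (A=1 to Z=26).
--
--     Args:
--         char: A single character to convert
--
--     Returns:
--         The numeric value (1-26) for the letter, or 0 for non-letters
--
--     Example:
--         >>> get_letter_value('A')
--         1
--         >>> get_letter_value('Z')
--         26
--         >>> get_letter_value('!')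
--         0
--     """
--     return alphabet.get(char.upper(), 0)
--
-- def reduce_number(num: int) -> int:
--     """
--     Reduce a number to a single digit by summing its digits.
--
--     Args:
--         num: The number to reduce
--
--     Returns:
--         A single digit (0-9)
--
--     Example:
--         >>> reduce_number(98)
--         8  # 9 + 8 = 17, 1 + 7 = 8
--     """
--     while num >= 10:
--         num = sum(int(digit) for digit in str(num))
--     return num
--
-- def compress_word(word: str) -> Tuple[int, int]:
--     """
--     Compress a word using the Symbolic Weight Protocol.
--
--     For single words:
--     - Calculate total letter values
--     - Reduce once to get final value
--     - Return both reduced and total sum for tie breaking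
--
--     For compound words (with underscores or spaces):
--     - Split into parts
--     - Calculate reduced sum for each part
--     - Sum the reduced values
--     - Return both final sum and original total
--
--     Args:
--         word: The word to compress
--
--     Returns:
--         A tuple of (reduced, total) where:
--         - reduced is the single-digit weight (0-9)
--         - total is the sum of reduced values (for tie breaking)
--
--     Example:
--         >>> compress_word("Python")
--         (8, 98)  # P(16) + Y(25) + T(20) + H(8) + O(15) + N(14) = 98 → 17 → 8
--         >>> compress_word("build_web_ui")
--         (9, 18)  # build(7) + web(8) + ui(3) = 18 → 9
--     """
--     # Handle compound words (with underscores or spaces)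
--     parts = word.replace('_', ' ').split()
--
--     if not parts:
--         return 0, 0
--
--     # For single words, calculate total directly
--     if len(parts) == 1:
--         total = sum(get_letter_value(char) for char in parts[0])
--         return reduce_number(total), total
--
--     # For compound words, calculate reduced sum for each part
--     reduced_values = []
--     total = 0
--     for part in parts:
--         part_sum = sum(get_letter_value(char) for char in part)
--         reduced = reduce_number(part_sum)
--         reduced_values.append(reduced)
--         total += reduced
--
--     # Return the reduced total and original total
--     return total if total < 10 else reduce_number(total), total
-- ===== SOURCE B (Python) =====
-- def _digital_root(n):
--     return 0 if n == 0 else 1 + (n - 1) % 9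
--
-- def _letter_value(c):
--     o = ord(c.upper())
--     return o - 64 if 65 <= o <= 90 else 0
--
-- def compress_word(word):
--     parts = word.replace('_', ' ').split()
--     if not parts:
--         return 0, 0
--     sums = [sum(map(_letter_value, p)) for p in parts]
--     if len(sums) == 1:
--         return _digital_root(sums[0]), sums[0]
--     total = sum(map(_digital_root, sums))
--     return _digital_root(total), total
-- ===== Notes on version B (the rewrite author's own statement) =====
-- stated objective: simpler
-- what changed: Replaces the while-loop digit-sum reduction with the closed-form digital root 1+(n-1)%9, the 26-entry alphabet dict with direct ord() arithmetic, and the explicit accumulator loop plus final <10 branch with a map/sum over per-part sums.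
import Mathlib
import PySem

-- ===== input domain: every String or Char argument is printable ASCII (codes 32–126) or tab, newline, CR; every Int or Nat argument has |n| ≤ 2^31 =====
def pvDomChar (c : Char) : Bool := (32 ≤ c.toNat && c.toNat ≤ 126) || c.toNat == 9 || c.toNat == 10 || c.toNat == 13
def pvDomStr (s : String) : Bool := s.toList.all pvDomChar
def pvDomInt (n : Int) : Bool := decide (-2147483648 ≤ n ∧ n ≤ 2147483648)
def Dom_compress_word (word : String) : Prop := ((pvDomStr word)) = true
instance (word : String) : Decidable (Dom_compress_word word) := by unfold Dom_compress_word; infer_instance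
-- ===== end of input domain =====

-- B replaces A's while-loop digit-sum reduction by the closed-form digital root, the
-- alphabet dict by ord() arithmetic, and the accumulator loop by a map/sum (objective: simpler).

-- ===== PORT A =====

-- alphabet = {chr(i + 64): i for i in range(1, 27)}
def alphabetA : PySem.Dict Char Int :=
  (PySem.List.pyRange 1 27 1).foldl
    (fun d i => d.insert (Char.ofNat (i + 64).toNat) i) PySem.Dict.empty

-- get_letter_value(char) = alphabet.get(char.upper(), 0)
def get_letter_valueA (c : Char) : Int :=
  alphabetA.getD (PySem.Chars.upperChar c) 0

-- sum(int(digit) for digit in str(num)); int('-') would raise ValueError, so the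
-- `.getD 0` is exact for the nonnegative arguments reduce_number receives here.
def digitSumA (n : Int) : Int :=
  ((PySem.Int.toChars n).map (fun c => (PySem.Int.ofChars? [c]).getD 0)).sum

-- proof-side helper facts the port's termination argument cites
theorem f_digitChar (d : Nat) (_hd : d < 10) :
    (PySem.Int.ofChars? [Nat.digitChar d]).getD 0 = (d : Int) := by
  interval_cases d <;> decide

theorem core_sum (fuel : Nat) : ∀ (n : Nat) (ds : List Char), n < fuel →
    ((Nat.toDigitsCore 10 fuel n ds).map (fun c => (PySem.Int.ofChars? [c]).getD 0)).sum
      = ((Nat.digits 10 n).sum : Int)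
        + ((ds.map (fun c => (PySem.Int.ofChars? [c]).getD 0)).sum) := by
  induction fuel with
  | zero => intro n ds h; omega
  | succ fuel ih =>
    intro n ds h
    show (((if n / 10 = 0 then Nat.digitChar (n % 10) :: ds
            else Nat.toDigitsCore 10 fuel (n / 10) (Nat.digitChar (n % 10) :: ds))).map
            (fun c => (PySem.Int.ofChars? [c]).getD 0)).sum = _
    by_cases h0 : n / 10 = 0
    · simp only [h0, if_true, List.map_cons, List.sum_cons]
      rcases Nat.eq_zero_or_pos n with hn | hn
      · subst hn; simp [f_digitChar 0 (by omega)]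
      · rw [Nat.digits_def' (by omega) hn, h0]
        simp [f_digitChar (n % 10) (Nat.mod_lt _ (by omega))]
    · simp only [h0, if_false]
      rw [ih (n / 10) _ (by omega), Nat.digits_def' (b := 10) (by omega) (n := n) (by omega)]
      simp only [List.map_cons, List.sum_cons, f_digitChar (n % 10) (Nat.mod_lt _ (by omega))]
      push_cast
      ring

theorem digitSumA_eq (n : Int) (h : 0 ≤ n) :
    digitSumA n = ((Nat.digits 10 n.toNat).sum : Int) := by
  unfold digitSumA PySem.Int.toChars
  rw [if_neg (by omega)]
  rw [Nat.toDigits, core_sum (n.toNat + 1) n.toNat [] (by omega)]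
  simp

theorem digitSumA_lt (n : Int) (h : 10 ≤ n) : (digitSumA n).toNat < n.toNat := by
  rw [digitSumA_eq n (by omega)]
  have h1 : 0 < n.toNat / 10 := by omega
  have := Nat.digits_def' (b := 10) (by omega) (n := n.toNat) (by omega)
  have h2 := Nat.digit_sum_le 10 (n.toNat / 10)
  rw [this]
  simp only [List.sum_cons]
  omega

-- while num >= 10: num = sum(int(digit) for digit in str(num))
def reduce_numberA (num : Int) : Int :=
  if h : 10 ≤ num then reduce_numberA (digitSumA num) else num
  termination_by num.toNat
  decreasing_by exact digitSumA_lt num h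

def compress_word (word : String) : Int × Int :=
  let parts := PySem.Str.split₀ (PySem.Str.replace word "_" " ")
  if parts = [] then (0, 0)
  else if parts.length = 1 then
    let total := ((PySem.List.pyGetD parts 0 "").toList.map get_letter_valueA).sum
    (reduce_numberA total, total)
  else
    let st := parts.foldl
      (fun (s : List Int × Int) part =>
        let part_sum := (part.toList.map get_letter_valueA).sum
        let reduced := reduce_numberA part_sum
        (s.1 ++ [reduced], s.2 + reduced)) ([], 0)
    (if st.2 < 10 then st.2 else reduce_numberA st.2, st.2)

-- ===== PORT B =====

def digital_rootB (n : Int) : Int :=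
  if n = 0 then 0 else 1 + PySem.Int.mod (n - 1) 9

def letter_valueB (c : Char) : Int :=
  if 65 ≤ ((PySem.Chars.upperChar c).toNat : Int) ∧ ((PySem.Chars.upperChar c).toNat : Int) ≤ 90
  then ((PySem.Chars.upperChar c).toNat : Int) - 64 else 0

def compress_word_alt (word : String) : Int × Int :=
  let parts := PySem.Str.split₀ (PySem.Str.replace word "_" " ")
  if parts = [] then (0, 0)
  else
    let sums := parts.map (fun p => (p.toList.map letter_valueB).sum)
    if sums.length = 1 then
      (digital_rootB (PySem.List.pyGetD sums 0 0), PySem.List.pyGetD sums 0 0)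
    else
      let total := (sums.map digital_rootB).sum
      (digital_rootB total, total)

-- ===== PRECONDITION & SPEC =====
def Spec_compress_word (word : String) (out : Int × Int) : Prop := out = compress_word_alt word
instance (word : String) (out : Int × Int) : Decidable (Spec_compress_word word out) := by unfold Spec_compress_word; infer_instance

-- ===== CLAIM (what is proved, stated in full; the proofs are below) =====
def Claim_equal_compress_word : Prop := ∀ (word : String), Dom_compress_word word → Spec_compress_word word (compress_word word)

-- ===== LEMMAS AND PROOFS =====

-- the 26-entry dict lookup is the ord() arithmetic
theorem alphabet_getD (u : Char) :
    alphabetA.getD u 0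
      = (if 65 ≤ (u.toNat : Int) ∧ (u.toNat : Int) ≤ 90 then (u.toNat : Int) - 64 else 0) := by
  have hA : alphabetA = PySem.Dict.mk
      [('A',1),('B',2),('C',3),('D',4),('E',5),('F',6),('G',7),('H',8),('I',9),('J',10),
       ('K',11),('L',12),('M',13),('N',14),('O',15),('P',16),('Q',17),('R',18),('S',19),
       ('T',20),('U',21),('V',22),('W',23),('X',24),('Y',25),('Z',26)] := by rfl
  by_cases h : 65 ≤ (u.toNat : Int) ∧ (u.toNat : Int) ≤ 90
  · rw [if_pos h]
    have h1 : 65 ≤ u.toNat := by exact_mod_cast h.1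
    have h2 : u.toNat ≤ 90 := by exact_mod_cast h.2
    have hu : u = Char.ofNat u.toNat := (Char.ofNat_toNat u).symm
    set m := u.toNat with hm
    interval_cases m <;> (rw [hu]; decide)
  · rw [if_neg h, hA]
    have hfind : List.find? (fun p => p.1 == u)
        ([('A',1),('B',2),('C',3),('D',4),('E',5),('F',6),('G',7),('H',8),('I',9),('J',10),
          ('K',11),('L',12),('M',13),('N',14),('O',15),('P',16),('Q',17),('R',18),('S',19),
          ('T',20),('U',21),('V',22),('W',23),('X',24),('Y',25),('Z',26)] : List (Char × Int)) = none := by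
      rw [List.find?_eq_none]
      intro p hp
      fin_cases hp <;>
        (simp only [beq_iff_eq]; intro hq; rw [← hq] at h; exact absurd (by decide) h)
    simp only [PySem.Dict.getD, PySem.Dict.get?, hfind, Option.map_none, Option.getD_none]

theorem letter_val_eq (c : Char) : get_letter_valueA c = letter_valueB c := by
  unfold get_letter_valueA letter_valueB
  exact alphabet_getD (PySem.Chars.upperChar c)

theorem letter_valueB_nonneg (c : Char) : 0 ≤ letter_valueB c := by
  unfold letter_valueB
  split_ifs with h <;> omega

theorem charsum_nonneg (p : String) : 0 ≤ (p.toList.map letter_valueB).sum := by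
  apply List.sum_nonneg
  intro x hx
  rcases List.mem_map.mp hx with ⟨c, _, rfl⟩
  exact letter_valueB_nonneg c

theorem sum_digits_pos (m : Nat) (h : 0 < m) : 0 < (Nat.digits 10 m).sum := by
  induction m using Nat.strong_induction_on with
  | _ m ih =>
    rw [Nat.digits_def' (by omega) h]
    simp only [List.sum_cons]
    rcases Nat.eq_zero_or_pos (m % 10) with h0 | h0
    · have h1 : 0 < m / 10 := by omega
      have := ih (m / 10) (by omega) h1
      omega
    · omega

theorem droot_small (n : Int) (h0 : 0 ≤ n) (h : n < 10) : digital_rootB n = n := by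
  unfold digital_rootB
  rcases eq_or_ne n 0 with rfl | hn
  · simp
  · rw [if_neg hn, PySem.Int.mod_eq_emod_of_pos (show (0:Int) < 9 by omega)]
    omega

theorem droot_nonneg (n : Int) (_h : 0 ≤ n) : 0 ≤ digital_rootB n := by
  unfold digital_rootB
  split_ifs with hn
  · omega
  · have := PySem.Int.mod_nonneg (n - 1) (b := 9) (by omega)
    omega

theorem droot_congr (m n : Int) (hm : 1 ≤ m) (hn : 1 ≤ n) (h : m % 9 = n % 9) :
    digital_rootB m = digital_rootB n := by
  unfold digital_rootB
  rw [if_neg (by omega), if_neg (by omega),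
    PySem.Int.mod_eq_emod_of_pos (show (0:Int) < 9 by omega),
    PySem.Int.mod_eq_emod_of_pos (show (0:Int) < 9 by omega)]
  have : (m - 1) % 9 = (n - 1) % 9 := Int.ModEq.sub_right 1 h
  omega

theorem reduceA_eq_droot_aux (k : Nat) : ∀ (n : Int), 0 ≤ n → n.toNat ≤ k →
    reduce_numberA n = digital_rootB n := by
  induction k with
  | zero =>
    intro n h hk
    rw [reduce_numberA, dif_neg (by omega), droot_small n h (by omega)]
  | succ k ih =>
    intro n h hk
    rw [reduce_numberA]
    by_cases h10 : 10 ≤ n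
    · rw [dif_pos h10]
      have hd : digitSumA n = ((Nat.digits 10 n.toNat).sum : Int) := digitSumA_eq n (by omega)
      have hlt := digitSumA_lt n h10
      have hpos : 0 < (Nat.digits 10 n.toNat).sum := sum_digits_pos n.toNat (by omega)
      rw [ih (digitSumA n) (by rw [hd]; positivity) (by omega)]
      apply droot_congr _ _ (by rw [hd]; exact_mod_cast hpos) (by omega)
      have hmod := Nat.modEq_nine_digits_sum n.toNat
      have : ((Nat.digits 10 n.toNat).sum : Int) % 9 = (n.toNat : Int) % 9 := by
        exact_mod_cast (Nat.ModEq.symm hmod)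
      rw [hd, this]
      congr 1
      omega
    · rw [dif_neg h10, droot_small n h (by omega)]

theorem reduceA_eq_droot (n : Int) (h : 0 ≤ n) : reduce_numberA n = digital_rootB n :=
  reduceA_eq_droot_aux n.toNat n h (le_refl _)

-- A's accumulator loop computes the sum of the per-part digital roots
theorem foldl_snd (parts : List String) : ∀ (acc : List Int × Int),
    (parts.foldl
      (fun (s : List Int × Int) part =>
        (s.1 ++ [reduce_numberA ((part.toList.map get_letter_valueA).sum)],
         s.2 + reduce_numberA ((part.toList.map get_letter_valueA).sum))) acc).2
      = acc.2 + ((parts.map (fun p => (p.toList.map letter_valueB).sum)).map digital_rootB).sum := by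
  induction parts with
  | nil => intro acc; simp
  | cons p rest ih =>
    intro acc
    rw [List.foldl_cons, ih]
    simp only [List.map_cons, List.sum_cons]
    have hmap : (p.toList.map get_letter_valueA) = (p.toList.map letter_valueB) :=
      List.map_congr_left (fun c _ => letter_val_eq c)
    rw [hmap, reduceA_eq_droot _ (charsum_nonneg p)]
    ring

-- the compound branch of A equals the compound branch of B
theorem compound_eq (parts : List String) :
    ((if (parts.foldl
        (fun (s : List Int × Int) part =>
          (s.1 ++ [reduce_numberA ((part.toList.map get_letter_valueA).sum)],
           s.2 + reduce_numberA ((part.toList.map get_letter_valueA).sum))) ([], 0)).2 < 10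
      then (parts.foldl
        (fun (s : List Int × Int) part =>
          (s.1 ++ [reduce_numberA ((part.toList.map get_letter_valueA).sum)],
           s.2 + reduce_numberA ((part.toList.map get_letter_valueA).sum))) ([], 0)).2
      else reduce_numberA (parts.foldl
        (fun (s : List Int × Int) part =>
          (s.1 ++ [reduce_numberA ((part.toList.map get_letter_valueA).sum)],
           s.2 + reduce_numberA ((part.toList.map get_letter_valueA).sum))) ([], 0)).2),
     (parts.foldl
        (fun (s : List Int × Int) part =>
          (s.1 ++ [reduce_numberA ((part.toList.map get_letter_valueA).sum)],
           s.2 + reduce_numberA ((part.toList.map get_letter_valueA).sum))) ([], 0)).2)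
    = (digital_rootB (((parts.map (fun p => (p.toList.map letter_valueB).sum)).map digital_rootB).sum),
       ((parts.map (fun p => (p.toList.map letter_valueB).sum)).map digital_rootB).sum) := by
  rw [foldl_snd parts ([], 0)]
  simp only [zero_add]
  have htn : 0 ≤ ((parts.map (fun p => (p.toList.map letter_valueB).sum)).map digital_rootB).sum := by
    apply List.sum_nonneg
    intro x hx
    rcases List.mem_map.mp hx with ⟨s, hs, rfl⟩
    rcases List.mem_map.mp hs with ⟨p, _, rfl⟩
    exact droot_nonneg _ (charsum_nonneg p)
  by_cases hlt : ((parts.map (fun p => (p.toList.map letter_valueB).sum)).map digital_rootB).sum < 10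
  · rw [if_pos hlt, droot_small _ htn hlt]
  · rw [if_neg hlt, reduceA_eq_droot _ htn]

-- ===== VERDICT (by name: the statement is the Claim_ definition above) =====
theorem compress_word_spec : Claim_equal_compress_word := by
  intro word _
  unfold Spec_compress_word
  show compress_word word = compress_word_alt word
  unfold compress_word compress_word_alt
  generalize PySem.Str.split₀ (PySem.Str.replace word "_" " ") = parts
  cases parts with
  | nil => rfl
  | cons p rest =>
    cases rest with
    | nil =>
      show (reduce_numberA ((p.toList.map get_letter_valueA).sum),
            (p.toList.map get_letter_valueA).sum)
          = (digital_rootB ((p.toList.map letter_valueB).sum),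
             (p.toList.map letter_valueB).sum)
      have hmap : (p.toList.map get_letter_valueA) = (p.toList.map letter_valueB) :=
        List.map_congr_left (fun c _ => letter_val_eq c)
      rw [hmap, reduceA_eq_droot _ (charsum_nonneg p)]
    | cons q rest => exact compound_eq (p :: q :: rest)
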